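-- pv_equiv track=rewrite | github.com/aquafastaghiggi/importadorexcel | python/process_excel.py | is_valid_form_region
-- ===== SOURCE A (Python) =====
-- def is_valid_form_region(headers_found):
--     blocks = {h["block"] for h in headers_found}
--
--     if "plano_negocios" not in blocks:
--         return False
--
--     meaningful = {
--         "plano_negocios",
--         "historico",
--         "objetivos",
--         "descricao_investimento",
--         "contrapartidas",
--         "contrapartidas_itens_foco",
--         "contrapartidas_acoes",
--         "encartes_obrigatorios",
--         "encartes_sugestao",
--         "cadastros_vinculados",
--         "situacao_liberacao",
--         "oportunidades_cadastros_liberacoes",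
--         "investimentos_extras",
--     }
--
--     found_meaningful = blocks.intersection(meaningful)
--     return len(found_meaningful) >= 2
-- ===== SOURCE B (Python) =====
-- # Meaningful blocks other than "plano_negocios".
-- _OTHER_MEANINGFUL = (
--     "historico",
--     "objetivos",
--     "descricao_investimento",
--     "contrapartidas",
--     "contrapartidas_itens_foco",
--     "contrapartidas_acoes",
--     "encartes_obrigatorios",
--     "encartes_sugestao",
--     "cadastros_vinculados",
--     "situacao_liberacao",
--     "oportunidades_cadastros_liberacoes",
--     "investimentos_extras",
-- )
--
--
-- def is_valid_form_region(headers_found):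
--     # Since "plano_negocios" is itself meaningful, the region is valid iff
--     # it appears AND at least one *other* meaningful block appears.
--     has_pn = False
--     has_other = False
--     for h in headers_found:
--         b = h["block"]
--         if b == "plano_negocios":
--             has_pn = True
--         elif b in _OTHER_MEANINGFUL:
--             has_other = True
--         if has_pn and has_other:
--             return True
--     return False
-- ===== Notes on version B (the rewrite author's own statement) =====
-- stated objective: alternative
-- what changed: B drops the set machinery entirely: since plano_negocios is itself meaningful, validity is 'plano_negocios seen and at least one other meaningful block seen', so B tracks two boolean flags in one pass with an early exit instead of building a blocks set and intersecting it with the whitelist.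
import Mathlib
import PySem

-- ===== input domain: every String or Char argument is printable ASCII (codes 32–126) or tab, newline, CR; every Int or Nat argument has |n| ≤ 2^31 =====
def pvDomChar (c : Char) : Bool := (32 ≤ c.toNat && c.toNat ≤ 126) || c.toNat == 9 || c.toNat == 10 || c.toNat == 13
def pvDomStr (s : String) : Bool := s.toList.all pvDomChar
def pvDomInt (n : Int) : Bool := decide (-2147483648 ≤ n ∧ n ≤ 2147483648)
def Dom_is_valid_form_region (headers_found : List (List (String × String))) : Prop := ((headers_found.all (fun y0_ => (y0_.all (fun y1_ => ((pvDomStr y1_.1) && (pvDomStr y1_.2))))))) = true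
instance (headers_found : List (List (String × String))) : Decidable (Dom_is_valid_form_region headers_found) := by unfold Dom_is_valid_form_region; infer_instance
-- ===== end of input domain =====

-- B drops the set machinery: plano_negocios is itself meaningful, so validity = plano_negocios seen and one other meaningful block seen; two flags, one pass, early exit. Return-value equivalence; neither side mutates.

-- ===== PORT A =====
-- the 'meaningful' set literal of A
def meaningfulA : PySem.Set String := PySem.Set.ofList
  ["plano_negocios", "historico", "objetivos", "descricao_investimento",
   "contrapartidas", "contrapartidas_itens_foco", "contrapartidas_acoes",
   "encartes_obrigatorios", "encartes_sugestao", "cadastros_vinculados",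
   "situacao_liberacao", "oportunidades_cadastros_liberacoes", "investimentos_extras"]

def is_valid_form_region (headers_found : List (List (String × String))) : Bool :=
  -- blocks = {h["block"] for h in headers_found}; Pre_ guarantees the key is present, so getD "" is exact there
  let blocks : PySem.Set String :=
    PySem.Set.ofList (headers_found.map (fun h => (h.lookup "block").getD ""))
  if !(PySem.Set.contains blocks "plano_negocios") then false
  else
    let found_meaningful := PySem.Set.inter blocks meaningfulA
    decide (PySem.Set.len found_meaningful ≥ 2)

-- ===== PORT B =====
-- the _OTHER_MEANINGFUL tuple of Source B
def otherMeaningfulB : List String :=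
  ["historico", "objetivos", "descricao_investimento",
   "contrapartidas", "contrapartidas_itens_foco", "contrapartidas_acoes",
   "encartes_obrigatorios", "encartes_sugestao", "cadastros_vinculados",
   "situacao_liberacao", "oportunidades_cadastros_liberacoes", "investimentos_extras"]

-- Source B's for-loop with its two flags and the early 'return True'
def altLoop : List (List (String × String)) → Bool → Bool → Bool
  | [], _, _ => false
  | h :: rest, has_pn, has_other =>
    let b := (h.lookup "block").getD ""
    let has_pn' := if b == "plano_negocios" then true else has_pn
    let has_other' := if !(b == "plano_negocios") && otherMeaningfulB.contains b then true else has_other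
    if has_pn' && has_other' then true else altLoop rest has_pn' has_other'

def is_valid_form_region_alt (headers_found : List (List (String × String))) : Bool :=
  altLoop headers_found false false

-- ===== PRECONDITION & SPEC =====
-- Pre_ excludes headers lacking a "block" key, on which Python A raises KeyError.
def Pre_is_valid_form_region (headers_found : List (List (String × String))) : Prop :=
  (headers_found.all (fun h => (h.lookup "block").isSome)) = true
instance (headers_found : List (List (String × String))) : Decidable (Pre_is_valid_form_region headers_found) := by unfold Pre_is_valid_form_region; infer_instance
def pvWitness_is_valid_form_region : (List (List (String × String))) :=
  [[("block", "plano_negocios")], [("block", "historico")]]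
def Spec_is_valid_form_region (headers_found : List (List (String × String))) (out : Bool) : Prop := out = is_valid_form_region_alt headers_found
instance (headers_found : List (List (String × String))) (out : Bool) : Decidable (Spec_is_valid_form_region headers_found out) := by unfold Spec_is_valid_form_region; infer_instance

-- ===== CLAIM (what is proved, stated in full; the proofs are below) =====
def Claim_equal_is_valid_form_region : Prop := ∀ (headers_found : List (List (String × String))), Dom_is_valid_form_region headers_found → Pre_is_valid_form_region headers_found → Spec_is_valid_form_region headers_found (is_valid_form_region headers_found)

-- ===== LEMMAS AND PROOFS =====

-- the flags are sticky: while not both set, the loop computes 'both conditions hold somewhere in the list'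
theorem altLoop_char (l : List (List (String × String))) (hp ho : Bool) (h : (hp && ho) = false) :
    altLoop l hp ho =
      ((hp || l.any (fun x => (x.lookup "block").getD "" == "plano_negocios")) &&
       (ho || l.any (fun x => !((x.lookup "block").getD "" == "plano_negocios") && otherMeaningfulB.contains ((x.lookup "block").getD "")))) := by
  induction l generalizing hp ho with
  | nil => cases hp <;> cases ho <;> simp_all [altLoop]
  | cons x rest ih =>
      simp only [altLoop, List.any_cons, Bool.if_true_left, Bool.decide_eq_true]
      generalize ((x.lookup "block").getD "" == "plano_negocios") = c1
      generalize (!c1 && otherMeaningfulB.contains ((x.lookup "block").getD "")) = c2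
      by_cases hbig : ((c1 || hp) && (c2 || ho)) = true
      · rw [hbig, Bool.true_or]
        cases c1 <;> cases hp <;> cases c2 <;> cases ho <;> simp_all
      · have hbig' : ((c1 || hp) && (c2 || ho)) = false := by
          revert hbig; cases ((c1 || hp) && (c2 || ho)) <;> simp
        rw [hbig', Bool.false_or, ih _ _ hbig']
        cases c1 <;> cases hp <;> cases c2 <;> cases ho <;> simp

-- a nodup list containing a: length >= 2 iff it has a member /= a
theorem nodup_two_mem {α : Type} [DecidableEq α] (l : List α) (a : α) (hnd : l.Nodup) (ha : a ∈ l) :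
    (2 ≤ l.length) ↔ ∃ x ∈ l, x ≠ a := by
  constructor
  · intro hlen
    by_contra hc
    push Not at hc
    match l, hnd, hlen with
    | x :: y :: rest, hnd, _ =>
        have hx : x = a := hc x (by simp)
        have hy : y = a := hc y (by simp)
        subst hx; subst hy
        simp at hnd
  · rintro ⟨x, hx, hxa⟩
    have hcard : l.toFinset.card = l.length := List.toFinset_card_of_nodup hnd
    rw [← hcard]
    have hsub : ({a, x} : Finset α).card ≤ l.toFinset.card := by
      apply Finset.card_le_card
      intro y hy
      simp at hy
      rcases hy with h | h <;> subst h <;> simp [List.mem_toFinset, ha, hx]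
    simpa [Finset.card_insert_of_notMem, Ne.symm hxa] using hsub

-- the whitelist of A is "plano_negocios" plus B's other-meaningful list
theorem memA_iff (x : String) :
    x ∈ meaningfulA ↔ x = "plano_negocios" ∨ x ∈ otherMeaningfulB := by
  rw [show meaningfulA = PySem.Set.ofList ("plano_negocios" :: otherMeaningfulB) from rfl,
      PySem.Set.mem_ofList, List.mem_cons]

-- A's set computation on the block list equals B's two existence tests
theorem char_A (l : List String) :
    (if !(PySem.Set.contains (PySem.Set.ofList l) "plano_negocios") then false
     else decide (2 ≤ PySem.Set.len (PySem.Set.inter (PySem.Set.ofList l) meaningfulA)))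
    = (l.any (fun b => b == "plano_negocios") &&
       l.any (fun b => !(b == "plano_negocios") && otherMeaningfulB.contains b)) := by
  by_cases hpn : "plano_negocios" ∈ l
  · have hc : PySem.Set.contains (PySem.Set.ofList l) "plano_negocios" = true := by
      rw [PySem.Set.contains_iff, PySem.Set.mem_ofList]; exact hpn
    have hmemI : "plano_negocios" ∈ PySem.Set.inter (PySem.Set.ofList l) meaningfulA := by
      rw [PySem.Set.mem_inter, PySem.Set.mem_ofList]
      exact ⟨hpn, by decide⟩
    have hnd : (PySem.Set.inter (PySem.Set.ofList l) meaningfulA).Nodup :=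
      PySem.Set.nodup_inter _ _ (PySem.Set.nodup_ofList l)
    have hiff : (2 ≤ PySem.Set.len (PySem.Set.inter (PySem.Set.ofList l) meaningfulA)) ↔
        ∃ x ∈ l, ¬(x = "plano_negocios") ∧ x ∈ otherMeaningfulB := by
      have h2 := nodup_two_mem _ _ hnd hmemI
      have hlen : PySem.Set.len (PySem.Set.inter (PySem.Set.ofList l) meaningfulA)
          = ((PySem.Set.inter (PySem.Set.ofList l) meaningfulA).length : Int) := rfl
      rw [hlen]
      constructor
      · intro h
        rcases h2.mp (by exact_mod_cast h) with ⟨x, hxI, hxne⟩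
        rw [PySem.Set.mem_inter, PySem.Set.mem_ofList, memA_iff] at hxI
        rcases hxI.2 with h | h
        · exact absurd h hxne
        · exact ⟨x, hxI.1, hxne, h⟩
      · rintro ⟨x, hxl, hxne, hxo⟩
        have hxI : x ∈ PySem.Set.inter (PySem.Set.ofList l) meaningfulA := by
          rw [PySem.Set.mem_inter, PySem.Set.mem_ofList, memA_iff]
          exact ⟨hxl, Or.inr hxo⟩
        exact_mod_cast h2.mpr ⟨x, hxI, hxne⟩
    rw [Bool.eq_iff_iff]
    simp only [hc, Bool.not_true, Bool.false_eq_true, if_false, decide_eq_true_eq,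
      Bool.and_eq_true, List.any_eq_true, beq_iff_eq, Bool.not_eq_eq_eq_not,
      Bool.not_true, beq_eq_false_iff_ne, List.contains_eq_mem, decide_eq_true_eq,
      ne_eq, hiff]
    constructor
    · rintro ⟨x, hxl, hxne, hxo⟩
      exact ⟨⟨"plano_negocios", hpn, rfl⟩, ⟨x, hxl, hxne, hxo⟩⟩
    · rintro ⟨_, hx⟩
      exact hx
  · have h1 : PySem.Set.contains (PySem.Set.ofList l) "plano_negocios" = false := by
      rw [Bool.eq_false_iff]
      intro hcon
      rw [PySem.Set.contains_iff, PySem.Set.mem_ofList] at hcon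
      exact hpn hcon
    have h2 : l.any (fun b => b == "plano_negocios") = false := by
      rw [List.any_eq_false]
      intro x hx
      simp only [beq_iff_eq]
      rintro rfl
      exact hpn hx
    rw [h1, h2, Bool.not_false, if_pos rfl, Bool.false_and]

-- ===== VERDICT (by name: the statement is the Claim_ definition above) =====
theorem is_valid_form_region_spec : Claim_equal_is_valid_form_region := by
  intro hf _ _
  unfold Spec_is_valid_form_region is_valid_form_region is_valid_form_region_alt
  rw [altLoop_char hf false false rfl]
  simp only [Bool.false_or]
  have h := char_A (hf.map (fun h => (h.lookup "block").getD ""))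
  simpa [List.any_map, Function.comp] using h
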